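-- pv_equiv track=rewrite | github.com/boonin123/mbta-green-line-sim | dashboard/map_view.py | _trim_to_journey
-- ===== SOURCE A (Python) =====
-- def _trim_to_journey(event_log: list[dict],
--                      origin_id: str, dest_id: str) -> list[dict]:
--     """
--     Slice event log to the portion from first arrival at origin through
--     arrival at destination. Returns the full log if either stop is missing.
--     """
--     origin_idx = next(
--         (i for i, e in enumerate(event_log)
--          if e["event"] == "arrived" and e["station_id"] == origin_id),
--         None,
--     )
--     if origin_idx is None:
--         return event_log
--
--     dest_idx = next(
--         (i for i in range(origin_idx, len(event_log))
--          if event_log[i]["event"] == "arrived"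
--          and event_log[i]["station_id"] == dest_id),
--         None,
--     )
--     if dest_idx is None:
--         return event_log[origin_idx:]
--
--     return event_log[origin_idx: dest_idx + 1]
-- ===== SOURCE B (Python) =====
-- def _trim_to_journey(event_log: list[dict],
--                      origin_id: str, dest_id: str) -> list[dict]:
--     """Consume a single iterator: drop events until the origin arrival, then
--     build the journey by appending events through the first destination
--     arrival (checked on the origin event itself too). No indices, no slicing."""
--     def arr(e, sid):
--         return e["event"] == "arrived" and e["station_id"] == sid
--
--     it = iter(event_log)
--     for e in it:
--         if arr(e, origin_id):
--             out = [e]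
--             if arr(e, dest_id):
--                 return out
--             for e2 in it:
--                 out.append(e2)
--                 if arr(e2, dest_id):
--                     return out
--             return out
--     return event_log
-- ===== Notes on version B (the rewrite author's own statement) =====
-- stated objective: alternative
-- what changed: Replaces A's index-based design (two next() scans computing integer indices, then slicing the log) by an iterator-consuming construction: one shared iterator is drained past the prefix, and the journey list is materialised element by element with append, ending at the first destination arrival; no indices or slices are ever computed.
import Mathlib
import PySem

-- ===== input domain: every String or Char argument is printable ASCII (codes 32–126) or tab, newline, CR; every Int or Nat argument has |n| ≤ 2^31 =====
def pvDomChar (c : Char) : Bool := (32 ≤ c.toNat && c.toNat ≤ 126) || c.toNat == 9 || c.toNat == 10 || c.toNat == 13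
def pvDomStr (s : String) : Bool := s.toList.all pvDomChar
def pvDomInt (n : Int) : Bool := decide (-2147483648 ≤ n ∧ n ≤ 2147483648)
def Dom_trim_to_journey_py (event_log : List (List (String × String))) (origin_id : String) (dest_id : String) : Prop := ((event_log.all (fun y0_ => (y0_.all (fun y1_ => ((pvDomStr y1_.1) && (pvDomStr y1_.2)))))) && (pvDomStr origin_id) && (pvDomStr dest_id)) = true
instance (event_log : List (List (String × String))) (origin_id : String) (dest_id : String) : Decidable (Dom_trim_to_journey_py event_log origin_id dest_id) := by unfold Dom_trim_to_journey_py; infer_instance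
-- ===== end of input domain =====

-- B replaces A's index-and-slice design by an iterator-consuming, append-built journey list (objective: alternative, same cost).

-- ===== PORT A =====
-- first-match association-list lookup (the dict convention: lookup = first match)
def pvLookup : List (String × String) → String → Option String
  | [], _ => none
  | (k, v) :: rest, key => if k == key then some v else pvLookup rest key

-- A's predicate e["event"] == "arrived" and e["station_id"] == sid.  Python raises KeyError on a
-- missing key; those inputs are excluded by Pre_trim_to_journey_py, so on the admitted inputs the
-- 'none => false' branches are never the deciding case at any index A's scans touch.
def pvArrA (e : List (String × String)) (sid : String) : Bool :=
  match pvLookup e "event" with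
  | none => false
  | some v =>
    v == "arrived" &&
      (match pvLookup e "station_id" with
       | none => false
       | some s => s == sid)

-- next((i for i, e in enumerate(...) if p e), None), scanning with running index i
def pvFindA (xs : List (List (String × String))) (p : List (String × String) → Bool) (i : Nat) :
    Option Nat :=
  match xs with
  | [] => none
  | e :: rest => if p e then some i else pvFindA rest p (i + 1)

def trim_to_journey_py (event_log : List (List (String × String))) (origin_id : String) (dest_id : String) : List (List (String × String)) :=
  match pvFindA event_log (fun e => pvArrA e origin_id) 0 with
  | none => event_log
  | some oi =>
    -- next((i for i in range(origin_idx, len(event_log)) if …), None): scan from index oi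
    match pvFindA (event_log.drop oi) (fun e => pvArrA e dest_id) oi with
    | none => PySem.List.slice event_log (some (oi : Int)) none
    | some di => PySem.List.slice event_log (some (oi : Int)) (some ((di : Int) + 1))

-- ===== PORT B =====
-- B's predicate arr(e, sid); as in port A, Python raises KeyError on a missing key (excluded by
-- Pre_trim_to_journey_py); here a miss makes the test false
def pvArrB (e : List (String × String)) (sid : String) : Bool :=
  (pvLookup e "event" == some "arrived") && (pvLookup e "station_id" == some sid)

-- Source B's inner 'for e2 in it' loop: out is the accumulator, rest the unconsumed iterator
def pvInnerB (dest_id : String) (out : List (List (String × String))) :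
    List (List (String × String)) → List (List (String × String))
  | [] => out
  | e2 :: rest =>
    let out' := out ++ [e2]
    if pvArrB e2 dest_id then out' else pvInnerB dest_id out' rest

-- Source B's outer 'for e in it' loop: rest is the unconsumed iterator
def pvOuterB (event_log : List (List (String × String))) (origin_id dest_id : String) :
    List (List (String × String)) → List (List (String × String))
  | [] => event_log
  | e :: rest =>
    if pvArrB e origin_id then
      if pvArrB e dest_id then [e] else pvInnerB dest_id [e] rest
    else pvOuterB event_log origin_id dest_id rest

def trim_to_journey_py_alt (event_log : List (List (String × String))) (origin_id : String) (dest_id : String) : List (List (String × String)) :=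
  pvOuterB event_log origin_id dest_id event_log

-- ===== PRECONDITION & SPEC =====
-- value of the first pair with the given key (the dict convention: lookup = first match)
def pvVal (e : List (String × String)) (k : String) : Option String :=
  (e.find? (fun p => p.1 == k)).map (·.2)

-- 'arrived at sid' event
def pvIsArrival (e : List (String × String)) (sid : String) : Bool :=
  (pvVal e "event" == some "arrived") && (pvVal e "station_id" == some sid)

-- an event dict A can evaluate its predicate on without KeyError
def pvGood (e : List (String × String)) : Bool :=
  (pvVal e "event").isSome && (!(pvVal e "event" == some "arrived") || (pvVal e "station_id").isSome)

-- from the first origin arrival on, every event up to (and including) the first destination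
-- arrival must be a well-formed dict (A's second scan reads them)
def pvTouchedAfter (dest_id : String) : List (List (String × String)) → Bool
  | [] => true
  | e :: rest => pvGood e && (pvIsArrival e dest_id || pvTouchedAfter dest_id rest)

-- before the first origin arrival, every event must be a well-formed dict (A's first scan reads them)
def pvTouchedBefore (origin_id dest_id : String) : List (List (String × String)) → Bool
  | [] => true
  | e :: rest =>
    pvGood e &&
      (if pvIsArrival e origin_id then pvTouchedAfter dest_id (e :: rest)
       else pvTouchedBefore origin_id dest_id rest)

-- Exactly the inputs on which Python A returns normally (no KeyError): every event dict in the
-- read prefix — up to the first origin arrival, then on to the first destination arrival — HAS the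
-- needed keys; dicts after the journey's end are never read and may be arbitrary.  This is a shape
-- condition on the input (key presence in a prefix), not either port's computation (the ports
-- compute slices/journeys, never key presence); it is stated as a prefix scan rather than with
-- nested index quantifiers because kernel 'decide' cannot evaluate the quantifier form in time.
def Pre_trim_to_journey_py (event_log : List (List (String × String))) (origin_id : String) (dest_id : String) : Prop :=
  pvTouchedBefore origin_id dest_id event_log = true

instance (event_log : List (List (String × String))) (origin_id : String) (dest_id : String) : Decidable (Pre_trim_to_journey_py event_log origin_id dest_id) := by unfold Pre_trim_to_journey_py; infer_instance

def pvWitness_trim_to_journey_py : (List (List (String × String))) × String × String :=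
  ([[("event", "arrived"), ("station_id", "a")], [("event", "arrived"), ("station_id", "b")]], "a", "b")

def Spec_trim_to_journey_py (event_log : List (List (String × String))) (origin_id : String) (dest_id : String) (out : List (List (String × String))) : Prop := out = trim_to_journey_py_alt event_log origin_id dest_id
instance (event_log : List (List (String × String))) (origin_id : String) (dest_id : String) (out : List (List (String × String))) : Decidable (Spec_trim_to_journey_py event_log origin_id dest_id out) := by unfold Spec_trim_to_journey_py; infer_instance

-- ===== CLAIM (what is proved, stated in full; the proofs are below) =====
def Claim_equal_trim_to_journey_py : Prop := ∀ (event_log : List (List (String × String))) (origin_id : String) (dest_id : String), Dom_trim_to_journey_py event_log origin_id dest_id → Pre_trim_to_journey_py event_log origin_id dest_id → Spec_trim_to_journey_py event_log origin_id dest_id (trim_to_journey_py event_log origin_id dest_id)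

-- ===== LEMMAS AND PROOFS =====

-- the two predicates compute the same Boolean
theorem pvArr_eq (e : List (String × String)) (sid : String) : pvArrA e sid = pvArrB e sid := by
  unfold pvArrA pvArrB
  cases h1 : pvLookup e "event" with
  | none => simp
  | some v =>
    cases h2 : pvLookup e "station_id" with
    | none => simp
    | some s => by_cases hv : v = "arrived" <;> simp [hv]

theorem pvFindA_ge (xs : List (List (String × String))) (p : List (String × String) → Bool)
    (i m : Nat) (h : pvFindA xs p i = some m) : i ≤ m := by
  induction xs generalizing i with
  | nil => simp [pvFindA] at h
  | cons e rest ih =>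
    unfold pvFindA at h
    by_cases hp : p e = true
    · simp [hp] at h; omega
    · simp [hp] at h; have := ih (i + 1) h; omega

-- shifting the running index of pvFindA
theorem pvFindA_shift (xs : List (List (String × String))) (p : List (String × String) → Bool)
    (i : Nat) : pvFindA xs p i = (pvFindA xs p 0).map (· + i) := by
  induction xs generalizing i with
  | nil => simp [pvFindA]
  | cons e rest ih =>
    by_cases hp : p e = true
    · simp [pvFindA, hp]
    · simp only [pvFindA, hp, Bool.false_eq_true, reduceIte]
      rw [ih (i + 1), ih 1]
      cases pvFindA rest p 0 <;> simp <;> omega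

-- Source B's inner loop appends the take-through-first-destination segment of the remaining iterator
theorem pvInnerB_eq (d : String) (out xs : List (List (String × String))) :
    pvInnerB d out xs =
      out ++ (match pvFindA xs (fun e => pvArrB e d) 0 with
              | none => xs
              | some k => xs.take (k + 1)) := by
  induction xs generalizing out with
  | nil => simp [pvInnerB, pvFindA]
  | cons e rest ih =>
    simp only [pvInnerB, pvFindA]
    by_cases hd : pvArrB e d = true
    · simp [hd]
    · rw [if_neg (by simp [hd]), ih, ]
      rw [pvFindA_shift rest (fun e => pvArrB e d) 1]
      cases hf : pvFindA rest (fun e => pvArrB e d) 0 with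
      | none => simp [hd]
      | some k => simp [hd, List.take_succ_cons]

-- Source B's outer loop, running over the suffix full.drop i, computes A's whole result
theorem pvOuterB_eq (full : List (List (String × String))) (o d : String)
    (xs : List (List (String × String))) (i : Nat) (hx : full.drop i = xs) :
    pvOuterB full o d xs =
      match pvFindA xs (fun e => pvArrB e o) i with
      | none => full
      | some oi =>
        match pvFindA (xs.drop (oi - i)) (fun e => pvArrB e d) oi with
        | none => PySem.List.slice full (some (oi : Int)) none
        | some di => PySem.List.slice full (some (oi : Int)) (some ((di : Int) + 1)) := by
  induction xs generalizing i with
  | nil => simp [pvOuterB, pvFindA]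
  | cons e rest ih =>
    have hx' : full.drop (i + 1) = rest := by
      have h1 := congrArg (List.drop 1) hx
      simpa [List.drop_drop, Nat.add_comm] using h1
    simp only [pvOuterB, pvFindA]
    by_cases ho : pvArrB e o = true
    · -- origin found at index i; second scan starts at this very element
      simp only [ho, reduceIte, Nat.sub_self, List.drop_zero, pvFindA]
      by_cases hd : pvArrB e d = true
      · -- origin event is itself the destination arrival: one-element journey
        simp only [hd, reduceIte]
        have hc : ((i : Int) + 1) = ((i + 1 : Nat) : Int) := by push_cast; ring
        rw [hc, PySem.List.slice_natCast, hx]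
        simp
      · simp only [hd, Bool.false_eq_true, reduceIte]
        rw [pvInnerB_eq, pvFindA_shift rest (fun e => pvArrB e d) (i + 1)]
        cases hf : pvFindA rest (fun e => pvArrB e d) 0 with
        | none =>
          simp only [Option.map_none]
          rw [PySem.List.slice_from_natCast, hx]
          simp
        | some k =>
          simp only [Option.map_some]
          have hc : ((k + (i + 1) : Nat) : Int) + 1 = ((k + i + 2 : Nat) : Int) := by
            push_cast; ring
          rw [hc, PySem.List.slice_natCast, hx]
          have h2 : k + i + 2 - i = k + 2 := by omega
          simp [h2, List.take_succ_cons]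
    · simp only [ho, Bool.false_eq_true, reduceIte]
      rw [ih (i + 1) hx']
      cases hf : pvFindA rest (fun e => pvArrB e o) (i + 1) with
      | none => simp
      | some oi =>
        have hge := pvFindA_ge _ _ _ _ hf
        have h1 : oi - i = (oi - (i + 1)) + 1 := by omega
        simp [h1, List.drop_succ_cons]

-- ===== VERDICT (by name: the statement is the Claim_ definition above) =====
theorem trim_to_journey_py_spec : Claim_equal_trim_to_journey_py := by
  intro event_log origin_id dest_id _ _
  unfold Spec_trim_to_journey_py trim_to_journey_py trim_to_journey_py_alt
  rw [pvOuterB_eq event_log origin_id dest_id event_log 0 (by simp)]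
  simp [pvArr_eq]
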